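-- pv_equiv track=rewrite | github.com/sandeep-shaw10/py-aes | aes128.py | __addPadding
-- ===== SOURCE A (Python) =====
-- def __addPadding(data):
--     bytes = 16
--     bits_arr = []
--     while(True):
--         if(len(data) > bytes):
--             bits_arr.append(data[:bytes])
--             data = data[bytes:]
--         else:
--             space = bytes-len(data)
--             bits_arr.append(data + chr(space)*space)
--             break
--     return bits_arr
-- ===== SOURCE B (Python) =====
-- def __addPadding(data):
--     n = len(data)
--     k = max(0, (n + 15) // 16 - 1)      # number of full unpadded blocks emitted
--     tail = data[16 * k:]
--     space = 16 - len(tail)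
--     padded = data + chr(space) * space
--     return [padded[i:i + 16] for i in range(0, len(padded), 16)]
-- ===== Notes on version B (the rewrite author's own statement) =====
-- stated objective: faster
-- what changed: B replaces A's while-loop that repeatedly reslices the shrinking string (copying the remainder each iteration) with an up-front computation of the pad from the full-block count k=(n+15)//16-1, building the padded string once and slicing all 16-byte blocks in a single comprehension.
import Mathlib
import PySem

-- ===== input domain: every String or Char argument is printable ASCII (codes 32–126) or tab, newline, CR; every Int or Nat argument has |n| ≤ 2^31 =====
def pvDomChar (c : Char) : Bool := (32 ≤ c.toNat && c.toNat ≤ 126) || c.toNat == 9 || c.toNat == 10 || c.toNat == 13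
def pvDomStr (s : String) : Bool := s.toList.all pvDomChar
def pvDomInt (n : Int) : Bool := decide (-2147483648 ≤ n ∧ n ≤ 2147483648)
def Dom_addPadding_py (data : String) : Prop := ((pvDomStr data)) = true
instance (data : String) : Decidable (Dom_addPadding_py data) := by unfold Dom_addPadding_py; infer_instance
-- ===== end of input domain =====

-- B replaces A's quadratic reslice-and-loop with one up-front padding computation and a
-- single comprehension over block offsets (objective: faster, O(n^2) -> O(n), measured).

-- ===== PORT A =====
-- A's while-loop: peel 16 chars while more than 16 remain, then pad the tail.
def aLoop (cs : List Char) : List String :=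
  if _h : 16 < PySem.List.len cs then
    String.ofList (PySem.List.slice cs none (some 16)) ::
      aLoop (PySem.List.slice cs (some 16) none)
  else
    [String.ofList (cs ++ List.replicate (16 - PySem.List.len cs).toNat
        (Char.ofNat (16 - PySem.List.len cs).toNat))]
termination_by cs.length
decreasing_by
  show (PySem.List.slice cs (some 16) none).length < cs.length
  rw [PySem.List.slice_from cs (by norm_num : (0:Int) ≤ 16)]
  simp only [PySem.List.len_eq] at _h
  simp only [List.length_drop]
  omega

def addPadding_py (data : String) : List String := aLoop data.toList

-- ===== PORT B =====
def bAlt (cs : List Char) : List String :=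
  let n : Int := PySem.List.len cs
  let k : Int := max 0 (PySem.Int.floordiv (n + 15) 16 - 1)
  let tail := PySem.List.slice cs (some (16 * k)) none
  let space : Int := 16 - PySem.List.len tail
  let padded := cs ++ List.replicate space.toNat (Char.ofNat space.toNat)
  (PySem.List.pyRange 0 (PySem.List.len padded) 16).map
    (fun i => String.ofList (PySem.List.slice padded (some i) (some (i + 16))))

def addPadding_py_alt (data : String) : List String := bAlt data.toList

-- ===== PRECONDITION & SPEC =====
def Spec_addPadding_py (data : String) (out : List String) : Prop := out = addPadding_py_alt data
instance (data : String) (out : List String) : Decidable (Spec_addPadding_py data out) := by unfold Spec_addPadding_py; infer_instance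

-- ===== CLAIM (what is proved, stated in full; the proofs are below) =====
def Claim_equal_addPadding_py : Prop := ∀ (data : String), Dom_addPadding_py data → Spec_addPadding_py data (addPadding_py data)

-- ===== LEMMAS AND PROOFS =====

-- number of full blocks before the padded tail, in Nat (Nat subtraction gives the max-with-0)
def kNat (cs : List Char) : Nat := (cs.length + 15) / 16 - 1

def spOf (cs : List Char) : Nat := 16 - (cs.length - 16 * kNat cs)

def padOf (cs : List Char) : List Char :=
  cs ++ List.replicate (spOf cs) (Char.ofNat (spOf cs))

def blocksOf (xs : List Char) : List String :=
  (PySem.List.pyRange 0 (PySem.List.len xs) 16).map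
    (fun i => String.ofList (PySem.List.slice xs (some i) (some (i + 16))))

lemma kNat_le (cs : List Char) : 16 * kNat cs ≤ cs.length ∧ cs.length - 16 * kNat cs ≤ 16 := by
  unfold kNat; omega

lemma padOf_len (cs : List Char) : (padOf cs).length = 16 * (kNat cs + 1) := by
  obtain ⟨h1, h2⟩ := kNat_le cs
  simp [padOf, spOf]
  unfold kNat at *
  omega

lemma blocksOf_eq (xs : List Char) (m : Nat) (h : xs.length = 16 * (m + 1)) :
    blocksOf xs =
      (List.range (m + 1)).map (fun k => String.ofList ((xs.drop (16 * k)).take 16)) := by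
  unfold blocksOf
  rw [PySem.List.pyRange_of_pos 0 (PySem.List.len xs) (by norm_num)]
  have hb : (0 : Int) < PySem.List.len xs := by
    simp [PySem.List.len_eq, h]
  rw [if_pos hb]
  have hcount : ((PySem.List.len xs - 0 + 16 - 1) / 16).toNat = m + 1 := by
    simp only [PySem.List.len_eq, h]
    push_cast
    omega
  rw [hcount, List.map_map]
  refine List.map_congr_left ?_
  intro k _
  simp only [Function.comp]
  have h2 : (0 + 16 * (k : Int) + 16) = ((16 * k : Nat) : Int) + ((16 : Nat) : Int) := by
    push_cast; ring
  have h1 : (0 + 16 * (k : Int)) = ((16 * k : Nat) : Int) := by push_cast; ring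
  rw [h2, h1, PySem.List.slice_natCast_add]

lemma blocksOf_append (pre rest : List Char) (m : Nat)
    (hp : pre.length = 16) (hr : rest.length = 16 * (m + 1)) :
    blocksOf (pre ++ rest) = String.ofList pre :: blocksOf rest := by
  rw [blocksOf_eq (pre ++ rest) (m + 1) (by simp [hp, hr]; ring),
      blocksOf_eq rest m hr, List.range_succ_eq_map, List.map_cons, List.map_map]
  congr 1
  · rw [Nat.mul_zero, List.drop_zero, List.take_left' hp]
  · refine List.map_congr_left ?_
    intro k _
    simp only [Function.comp]
    have he : 16 * (k + 1) = pre.length + 16 * k := by omega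
    have h0 : List.drop (pre.length + 16 * k) pre = [] :=
      List.drop_eq_nil_of_le (by omega)
    rw [he, List.drop_append, h0]
    simp

lemma bAlt_closed (cs : List Char) : bAlt cs = blocksOf (padOf cs) := by
  unfold bAlt
  have hk : max 0 (PySem.Int.floordiv ((PySem.List.len cs) + 15) 16 - 1)
      = ((kNat cs : Nat) : Int) := by
    rw [PySem.Int.floordiv_eq_ediv_of_pos (by norm_num)]
    simp only [PySem.List.len_eq]
    unfold kNat
    omega
  simp only [hk]
  have h1 : PySem.List.slice cs (some (16 * ((kNat cs : Nat) : Int))) none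
      = cs.drop (16 * kNat cs) := by
    rw [show (16 * ((kNat cs : Nat) : Int)) = ((16 * kNat cs : Nat) : Int) by push_cast; ring,
        PySem.List.slice_from_natCast]
  rw [h1]
  have h2 : (16 - PySem.List.len (cs.drop (16 * kNat cs))).toNat = spOf cs := by
    obtain ⟨ha, hb⟩ := kNat_le cs
    simp only [PySem.List.len_eq, List.length_drop, spOf]
    omega
  rw [h2]
  rfl

lemma aLoop_base (cs : List Char) (h : cs.length ≤ 16) :
    aLoop cs = [String.ofList (padOf cs)] := by
  rw [aLoop]
  rw [dif_neg (by simp only [PySem.List.len_eq]; omega)]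
  have hk : kNat cs = 0 := by unfold kNat; omega
  have hsp : (16 - PySem.List.len cs).toNat = spOf cs := by
    simp only [PySem.List.len_eq, spOf, hk]; omega
  rw [hsp]
  rfl

lemma aLoop_step (cs : List Char) (h : 16 < cs.length) :
    aLoop cs = String.ofList (cs.take 16) :: aLoop (cs.drop 16) := by
  rw [aLoop]
  rw [dif_pos (by simp only [PySem.List.len_eq]; omega)]
  rw [PySem.List.slice_to cs (by norm_num : (0:Int) ≤ 16), PySem.List.slice_from cs (by norm_num : (0:Int) ≤ 16)]
  have h16 : Int.toNat 16 = 16 := rfl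
  rw [h16]

lemma pad_step (cs : List Char) (h : 16 < cs.length) :
    padOf cs = cs.take 16 ++ padOf (cs.drop 16) := by
  have hk : kNat cs = kNat (cs.drop 16) + 1 := by
    unfold kNat
    simp only [List.length_drop]
    omega
  have hsp : spOf cs = spOf (cs.drop 16) := by
    unfold spOf
    simp only [List.length_drop, hk]
    omega
  unfold padOf
  rw [hsp, ← List.append_assoc, List.take_append_drop]

lemma base_case (cs : List Char) (h : cs.length ≤ 16) : aLoop cs = bAlt cs := by
  rw [aLoop_base _ h, bAlt_closed, blocksOf_eq _ (kNat cs) (padOf_len _)]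
  have hk : kNat cs = 0 := by unfold kNat; omega
  rw [hk]
  simp only [Nat.zero_add, List.range_one, List.map_cons, List.map_nil, Nat.mul_zero, List.drop_zero]
  rw [List.take_of_length_le (le_of_eq (by rw [padOf_len, hk]))]

lemma main_eq : ∀ (cs : List Char), aLoop cs = bAlt cs := by
  have H : ∀ (N : Nat) (cs : List Char), cs.length ≤ N → aLoop cs = bAlt cs := by
    intro N
    induction N with
    | zero =>
      intro cs hcs
      exact base_case cs (by omega)
    | succ N ih =>
      intro cs hcs
      rcases Nat.lt_or_ge 16 cs.length with h | h
      · rw [aLoop_step _ h, bAlt_closed, pad_step _ h,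
            blocksOf_append _ _ (kNat (cs.drop 16)) (by simp [List.length_take]; omega)
              (padOf_len _)]
        rw [ih (cs.drop 16) (by simp only [List.length_drop]; omega), bAlt_closed]
      · exact base_case cs (by omega)
  intro cs
  exact H cs.length cs le_rfl

-- ===== VERDICT (by name: the statement is the Claim_ definition above) =====
theorem addPadding_py_spec : Claim_equal_addPadding_py := by
  intro data _
  unfold Spec_addPadding_py addPadding_py addPadding_py_alt
  exact main_eq data.toList
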